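-- pv_equiv track=rewrite | github.com/BayramAnnakov/automation-assassin | src/core/situation_fingerprint.py | _categorize_content_type
-- ===== SOURCE A (Python) =====
-- from typing import Dict, List, Optional, Any, Tuple
--
-- def _categorize_content_type(content: Optional[str], app: str) -> str:
--     """Categorize content type (flexible, not rigid)"""
--     if not content and not app:
--         return "unknown"
--
--     combined = f"{app} {content or ''}".lower()
--
--     # These are hints for AI, not rigid rules
--     if any(x in combined for x in ['youtube', 'netflix', 'video', 'watch', 'movie']):
--         return "entertainment"
--     elif any(x in combined for x in ['code', 'ide', 'github', 'terminal', 'localhost']):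
--         return "development"
--     elif any(x in combined for x in ['slack', 'teams', 'discord', 'telegram', 'whatsapp']):
--         return "communication"
--     elif any(x in combined for x in ['docs', 'sheets', 'word', 'excel', 'notion']):
--         return "documentation"
--     elif any(x in combined for x in ['gmail', 'outlook', 'mail']):
--         return "email"
--     else:
--         return "mixed"
-- ===== SOURCE B (Python) =====
-- # Flat keyword -> priority-rank dict; one left-to-right scan of the combined
-- # string checks every keyword at each position and keeps the best (minimum)
-- # rank seen; the answer is the category of that rank.
-- _KEYWORD_RANK = {
--     'youtube': 0, 'netflix': 0, 'video': 0, 'watch': 0, 'movie': 0,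
--     'code': 1, 'ide': 1, 'github': 1, 'terminal': 1, 'localhost': 1,
--     'slack': 2, 'teams': 2, 'discord': 2, 'telegram': 2, 'whatsapp': 2,
--     'docs': 3, 'sheets': 3, 'word': 3, 'excel': 3, 'notion': 3,
--     'gmail': 4, 'outlook': 4, 'mail': 4,
-- }
-- _CATEGORIES = ["entertainment", "development", "communication",
--                "documentation", "email", "mixed"]
--
-- def _categorize_content_type(content, app):
--     """Categorize content type via a positional scan for the best-ranked keyword."""
--     if not content and not app:
--         return "unknown"
--     combined = f"{app} {content or ''}".lower()
--     best = 5
--     for i in range(len(combined)):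
--         for kw, rank in _KEYWORD_RANK.items():
--             if rank < best and combined.startswith(kw, i):
--                 best = rank
--     return _CATEGORIES[best]
-- ===== Notes on version B (the rewrite author's own statement) =====
-- stated objective: alternative
-- what changed: Replaces A's if/elif chain of per-keyword substring tests with a naive multi-pattern positional scan: one pass over the combined string checks each flat-dict keyword at every position and keeps the minimum priority rank, returning that rank's category.
import Mathlib
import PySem

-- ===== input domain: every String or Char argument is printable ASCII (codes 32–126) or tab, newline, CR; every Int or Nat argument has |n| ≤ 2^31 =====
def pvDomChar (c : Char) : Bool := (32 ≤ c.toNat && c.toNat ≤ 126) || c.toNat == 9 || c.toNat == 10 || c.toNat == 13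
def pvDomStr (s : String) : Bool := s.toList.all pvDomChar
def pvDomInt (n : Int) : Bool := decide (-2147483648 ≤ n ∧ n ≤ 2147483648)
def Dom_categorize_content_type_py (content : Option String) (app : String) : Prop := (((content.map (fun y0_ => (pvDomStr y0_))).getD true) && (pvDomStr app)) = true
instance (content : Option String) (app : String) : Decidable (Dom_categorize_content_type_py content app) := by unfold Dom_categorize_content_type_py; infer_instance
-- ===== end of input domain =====

-- B replaces A's if/elif chain of substring tests by a single positional scan that checks a flat keyword->rank dict at each index and returns the category of the minimum matched rank; alternative structure, same behaviour.


-- ===== PORT A =====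
-- `content or ''`: a falsy content (None or "") yields ""
def pvContentOrEmpty (content : Option String) : String :=
  match content with
  | none => ""
  | some s => if s = "" then "" else s

-- A's if/elif chain over the lower-cased combined string
def pvChainA (combined : String) : String :=
  if (["youtube", "netflix", "video", "watch", "movie"] : List String).any
      (fun x => PySem.Str.isIn x combined) then "entertainment"
  else if (["code", "ide", "github", "terminal", "localhost"] : List String).any
      (fun x => PySem.Str.isIn x combined) then "development"
  else if (["slack", "teams", "discord", "telegram", "whatsapp"] : List String).any
      (fun x => PySem.Str.isIn x combined) then "communication"
  else if (["docs", "sheets", "word", "excel", "notion"] : List String).any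
      (fun x => PySem.Str.isIn x combined) then "documentation"
  else if (["gmail", "outlook", "mail"] : List String).any
      (fun x => PySem.Str.isIn x combined) then "email"
  else "mixed"

def categorize_content_type_py (content : Option String) (app : String) : String :=
  if pvContentOrEmpty content = "" ∧ app = "" then "unknown"
  else
    pvChainA (PySem.Str.lower (String.ofList (app.toList ++ ' ' :: (pvContentOrEmpty content).toList)))

-- ===== PORT B =====
-- Source B's flat _KEYWORD_RANK dict, in insertion order
def pvKeywordRank : List (String × Nat) :=
  [ ("youtube", 0), ("netflix", 0), ("video", 0), ("watch", 0), ("movie", 0),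
    ("code", 1), ("ide", 1), ("github", 1), ("terminal", 1), ("localhost", 1),
    ("slack", 2), ("teams", 2), ("discord", 2), ("telegram", 2), ("whatsapp", 2),
    ("docs", 3), ("sheets", 3), ("word", 3), ("excel", 3), ("notion", 3),
    ("gmail", 4), ("outlook", 4), ("mail", 4) ]

def pvCategories : List String :=
  ["entertainment", "development", "communication", "documentation", "email", "mixed"]

-- body of Source B's outer loop: try every keyword at position i, keep the best rank
-- (combined.startswith(kw, i) with 0 ≤ i is exactly: kw is a prefix of the drop at i)
def pvScanStep (c : List Char) (best : Nat) (i : Nat) : Nat :=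
  pvKeywordRank.foldl
    (fun b p => if p.2 < b ∧ PySem.Chars.startswith (c.drop i) p.1.toList then p.2 else b) best

-- Source B's scan: best over all positions, starting from 5
def pvScanB (c : List Char) : Nat := (List.range c.length).foldl (pvScanStep c) 5

def categorize_content_type_py_alt (content : Option String) (app : String) : String :=
  if pvContentOrEmpty content = "" ∧ app = "" then "unknown"
  else
    -- _CATEGORIES[best]: best ≤ 5 always, so the getD default is never used
    pvCategories.getD
      (pvScanB (PySem.Str.lower (String.ofList (app.toList ++ ' ' :: (pvContentOrEmpty content).toList))).toList)
      "mixed"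

-- ===== PRECONDITION & SPEC =====
def Spec_categorize_content_type_py (content : Option String) (app : String) (out : String) : Prop := out = categorize_content_type_py_alt content app
instance (content : Option String) (app : String) (out : String) : Decidable (Spec_categorize_content_type_py content app out) := by unfold Spec_categorize_content_type_py; infer_instance

-- ===== CLAIM =====
def Claim_equal_categorize_content_type_py : Prop := ∀ (content : Option String) (app : String), Dom_categorize_content_type_py content app → Spec_categorize_content_type_py content app (categorize_content_type_py content app)

-- ===== LEMMAS AND PROOFS =====

-- a fold whose step never increases the accumulator ends below it
theorem pv_foldl_le {α : Type} (st : Nat → α → Nat) (h : ∀ b x, st b x ≤ b) :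
    ∀ (l : List α) (b : Nat), l.foldl st b ≤ b := by
  intro l
  induction l with
  | nil => intro b; simp
  | cons x xs ih => intro b; exact le_trans (ih (st b x)) (h b x)

-- if some member forces the accumulator below r, the whole fold ends below r
theorem pv_foldl_le_of_mem {α : Type} (st : Nat → α → Nat) (h : ∀ b x, st b x ≤ b)
    (l : List α) (x : α) (hx : x ∈ l) (r : Nat) (hr : ∀ b, st b x ≤ r) :
    ∀ b, l.foldl st b ≤ r := by
  induction l with
  | nil => cases hx
  | cons y ys ih =>
    intro b
    rcases List.mem_cons.mp hx with h1 | h2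
    · subst h1
      exact le_trans (pv_foldl_le st h ys (st b x)) (hr b)
    · exact ih h2 (st b y)

theorem pvScanStep_le (c : List Char) (b i : Nat) : pvScanStep c b i ≤ b := by
  unfold pvScanStep
  apply pv_foldl_le
  intro b p
  split_ifs with h
  · exact le_of_lt h.1
  · exact le_rfl

-- the inner keyword fold drops to p.2 once a matching p is seen
theorem pvInner_le_of_match (c : List Char) (i : Nat) (p : String × Nat)
    (hp : p ∈ pvKeywordRank) (hm : PySem.Chars.startswith (c.drop i) p.1.toList = true) :
    ∀ b, pvScanStep c b i ≤ p.2 := by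
  unfold pvScanStep
  refine pv_foldl_le_of_mem _ ?_ _ p hp _ ?_
  · intro b q
    split_ifs with h
    · exact le_of_lt h.1
    · exact le_rfl
  · intro b
    by_cases hb : p.2 < b
    · rw [if_pos ⟨hb, hm⟩]
    · rw [if_neg (by tauto)]; omega

theorem pvScanB_le_five (c : List Char) : pvScanB c ≤ 5 :=
  pv_foldl_le _ (fun b i => pvScanStep_le c b i) _ 5

-- every keyword in the dict is nonempty
theorem pvKeyword_ne_nil : ∀ p ∈ pvKeywordRank, p.1.toList ≠ [] := by decide

-- lower bound: a keyword occurring in c caps the scan at its rank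
theorem pvScanB_le_of_isIn (c : List Char) (p : String × Nat) (hp : p ∈ pvKeywordRank)
    (hin : PySem.Chars.isIn p.1.toList c = true) : pvScanB c ≤ p.2 := by
  obtain ⟨j, hj⟩ := (PySem.Chars.exists_prefix_drop_iff_isIn p.1.toList c).mpr hin
  have hjlt : j < c.length := by
    by_contra hge
    have : c.drop j = [] := List.drop_eq_nil_of_le (by omega)
    rw [this] at hj
    exact pvKeyword_ne_nil p hp (List.prefix_nil.mp hj)
  have hsw : PySem.Chars.startswith (c.drop j) p.1.toList = true :=
    (PySem.Chars.startswith_iff _ _).mpr hj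
  exact pv_foldl_le_of_mem (pvScanStep c) (fun b i => pvScanStep_le c b i)
    (List.range c.length) j (List.mem_range.mpr hjlt) p.2
    (pvInner_le_of_match c j p hp hsw) 5

-- achievement, inner fold: the result is the start or the rank of a keyword matching at i
theorem pvInner_achieve (c : List Char) (i : Nat) :
    ∀ (l : List (String × Nat)) (b : Nat),
      l.foldl (fun b p => if p.2 < b ∧ PySem.Chars.startswith (c.drop i) p.1.toList then p.2 else b) b = b ∨
      ∃ p ∈ l, l.foldl (fun b p => if p.2 < b ∧ PySem.Chars.startswith (c.drop i) p.1.toList then p.2 else b) b = p.2 ∧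
        PySem.Chars.startswith (c.drop i) p.1.toList = true := by
  intro l
  induction l with
  | nil => intro b; left; rfl
  | cons q qs ih =>
    intro b
    simp only [List.foldl_cons]
    by_cases h : q.2 < b ∧ PySem.Chars.startswith (c.drop i) q.1.toList = true
    · rw [if_pos (by exact ⟨h.1, h.2⟩)]
      rcases ih q.2 with h1 | ⟨p, hp, h2, h3⟩
      · right; exact ⟨q, List.mem_cons_self .., h1, h.2⟩
      · right; exact ⟨p, List.mem_cons_of_mem _ hp, h2, h3⟩
    · rw [if_neg h]
      rcases ih b with h1 | ⟨p, hp, h2, h3⟩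
      · left; exact h1
      · right; exact ⟨p, List.mem_cons_of_mem _ hp, h2, h3⟩

-- achievement restated for the scan step
theorem pvScanStep_achieve (c : List Char) (i b : Nat) :
    pvScanStep c b i = b ∨ ∃ p ∈ pvKeywordRank, pvScanStep c b i = p.2 ∧
      PySem.Chars.startswith (c.drop i) p.1.toList = true := by
  unfold pvScanStep
  exact pvInner_achieve c i pvKeywordRank b

-- achievement, outer fold: the scan result is the start or the rank of a keyword occurring in c
theorem pvScan_outer_achieve (c : List Char) :
    ∀ (is : List Nat) (b : Nat),
      is.foldl (pvScanStep c) b = b ∨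
      ∃ p ∈ pvKeywordRank, is.foldl (pvScanStep c) b = p.2 ∧ PySem.Chars.isIn p.1.toList c = true := by
  intro is
  induction is with
  | nil => intro b; left; rfl
  | cons i is ih =>
    intro b
    simp only [List.foldl_cons]
    rcases ih (pvScanStep c b i) with h4 | ⟨p, hp, h2, h3⟩
    · rcases pvScanStep_achieve c i b with h1 | ⟨p, hp, h2, h3⟩
      · left; rw [h4, h1]
      · right
        exact ⟨p, hp, h4.trans h2,
          (PySem.Chars.exists_prefix_drop_iff_isIn p.1.toList c).mp
            ⟨i, (PySem.Chars.startswith_iff _ _).mp h3⟩⟩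
    · right; exact ⟨p, hp, h2, h3⟩

theorem pvScanB_achieve (c : List Char) :
    pvScanB c = 5 ∨ ∃ p ∈ pvKeywordRank, pvScanB c = p.2 ∧ PySem.Chars.isIn p.1.toList c = true := by
  unfold pvScanB
  exact pvScan_outer_achieve c (List.range c.length) 5

-- every dict entry belongs to exactly its group
theorem pvRank_cases : ∀ p ∈ pvKeywordRank,
    (p.2 = 0 ∧ p.1 ∈ (["youtube", "netflix", "video", "watch", "movie"] : List String)) ∨
    (p.2 = 1 ∧ p.1 ∈ (["code", "ide", "github", "terminal", "localhost"] : List String)) ∨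
    (p.2 = 2 ∧ p.1 ∈ (["slack", "teams", "discord", "telegram", "whatsapp"] : List String)) ∨
    (p.2 = 3 ∧ p.1 ∈ (["docs", "sheets", "word", "excel", "notion"] : List String)) ∨
    (p.2 = 4 ∧ p.1 ∈ (["gmail", "outlook", "mail"] : List String)) := by decide

theorem pvGroup_mem0 : ∀ kw ∈ (["youtube", "netflix", "video", "watch", "movie"] : List String), (kw, 0) ∈ pvKeywordRank := by decide
theorem pvGroup_mem1 : ∀ kw ∈ (["code", "ide", "github", "terminal", "localhost"] : List String), (kw, 1) ∈ pvKeywordRank := by decide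
theorem pvGroup_mem2 : ∀ kw ∈ (["slack", "teams", "discord", "telegram", "whatsapp"] : List String), (kw, 2) ∈ pvKeywordRank := by decide
theorem pvGroup_mem3 : ∀ kw ∈ (["docs", "sheets", "word", "excel", "notion"] : List String), (kw, 3) ∈ pvKeywordRank := by decide
theorem pvGroup_mem4 : ∀ kw ∈ (["gmail", "outlook", "mail"] : List String), (kw, 4) ∈ pvKeywordRank := by decide

-- the chain and the scan agree on every string
theorem pvChainA_eq_scan (s : String) :
    pvChainA s = pvCategories.getD (pvScanB s.toList) "mixed" := by
  have hach := pvScanB_achieve s.toList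
  have hle5 := pvScanB_le_five s.toList
  unfold pvChainA
  by_cases H0 : (["youtube", "netflix", "video", "watch", "movie"] : List String).any (fun x => PySem.Str.isIn x s) = true
  · rw [if_pos H0]
    obtain ⟨kw, hkw, hin⟩ := List.any_eq_true.mp H0
    have hle := pvScanB_le_of_isIn s.toList (kw, 0) (pvGroup_mem0 kw hkw) (by simpa using hin)
    rw [show pvScanB s.toList = 0 by omega]; rfl
  · rw [if_neg H0]
    have hn0 : pvScanB s.toList ≠ 0 := by
      intro hz
      rcases hach with h5 | ⟨p, hp, hpe, hpin⟩
      · omega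
      · rcases pvRank_cases p hp with ⟨hr, hg⟩ | ⟨hr, _⟩ | ⟨hr, _⟩ | ⟨hr, _⟩ | ⟨hr, _⟩
        · exact H0 (List.any_eq_true.mpr ⟨p.1, hg, by simpa using hpin⟩)
        all_goals omega
    by_cases H1 : (["code", "ide", "github", "terminal", "localhost"] : List String).any (fun x => PySem.Str.isIn x s) = true
    · rw [if_pos H1]
      obtain ⟨kw, hkw, hin⟩ := List.any_eq_true.mp H1
      have hle := pvScanB_le_of_isIn s.toList (kw, 1) (pvGroup_mem1 kw hkw) (by simpa using hin)
      rw [show pvScanB s.toList = 1 by omega]; rfl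
    · rw [if_neg H1]
      have hn1 : pvScanB s.toList ≠ 1 := by
        intro hz
        rcases hach with h5 | ⟨p, hp, hpe, hpin⟩
        · omega
        · rcases pvRank_cases p hp with ⟨hr, _⟩ | ⟨hr, hg⟩ | ⟨hr, _⟩ | ⟨hr, _⟩ | ⟨hr, _⟩
          · omega
          · exact H1 (List.any_eq_true.mpr ⟨p.1, hg, by simpa using hpin⟩)
          all_goals omega
      by_cases H2 : (["slack", "teams", "discord", "telegram", "whatsapp"] : List String).any (fun x => PySem.Str.isIn x s) = true
      · rw [if_pos H2]
        obtain ⟨kw, hkw, hin⟩ := List.any_eq_true.mp H2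
        have hle := pvScanB_le_of_isIn s.toList (kw, 2) (pvGroup_mem2 kw hkw) (by simpa using hin)
        rw [show pvScanB s.toList = 2 by omega]; rfl
      · rw [if_neg H2]
        have hn2 : pvScanB s.toList ≠ 2 := by
          intro hz
          rcases hach with h5 | ⟨p, hp, hpe, hpin⟩
          · omega
          · rcases pvRank_cases p hp with ⟨hr, _⟩ | ⟨hr, _⟩ | ⟨hr, hg⟩ | ⟨hr, _⟩ | ⟨hr, _⟩
            · omega
            · omega
            · exact H2 (List.any_eq_true.mpr ⟨p.1, hg, by simpa using hpin⟩)
            all_goals omega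
        by_cases H3 : (["docs", "sheets", "word", "excel", "notion"] : List String).any (fun x => PySem.Str.isIn x s) = true
        · rw [if_pos H3]
          obtain ⟨kw, hkw, hin⟩ := List.any_eq_true.mp H3
          have hle := pvScanB_le_of_isIn s.toList (kw, 3) (pvGroup_mem3 kw hkw) (by simpa using hin)
          rw [show pvScanB s.toList = 3 by omega]; rfl
        · rw [if_neg H3]
          have hn3 : pvScanB s.toList ≠ 3 := by
            intro hz
            rcases hach with h5 | ⟨p, hp, hpe, hpin⟩
            · omega
            · rcases pvRank_cases p hp with ⟨hr, _⟩ | ⟨hr, _⟩ | ⟨hr, _⟩ | ⟨hr, hg⟩ | ⟨hr, _⟩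
              · omega
              · omega
              · omega
              · exact H3 (List.any_eq_true.mpr ⟨p.1, hg, by simpa using hpin⟩)
              · omega
          by_cases H4 : (["gmail", "outlook", "mail"] : List String).any (fun x => PySem.Str.isIn x s) = true
          · rw [if_pos H4]
            obtain ⟨kw, hkw, hin⟩ := List.any_eq_true.mp H4
            have hle := pvScanB_le_of_isIn s.toList (kw, 4) (pvGroup_mem4 kw hkw) (by simpa using hin)
            rw [show pvScanB s.toList = 4 by omega]; rfl
          · rw [if_neg H4]
            have h5 : pvScanB s.toList = 5 := by
              rcases hach with h5 | ⟨p, hp, hpe, hpin⟩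
              · exact h5
              · exfalso
                rcases pvRank_cases p hp with ⟨hr, hg⟩ | ⟨hr, hg⟩ | ⟨hr, hg⟩ | ⟨hr, hg⟩ | ⟨hr, hg⟩
                · exact H0 (List.any_eq_true.mpr ⟨p.1, hg, by simpa using hpin⟩)
                · exact H1 (List.any_eq_true.mpr ⟨p.1, hg, by simpa using hpin⟩)
                · exact H2 (List.any_eq_true.mpr ⟨p.1, hg, by simpa using hpin⟩)
                · exact H3 (List.any_eq_true.mpr ⟨p.1, hg, by simpa using hpin⟩)
                · exact H4 (List.any_eq_true.mpr ⟨p.1, hg, by simpa using hpin⟩)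
            rw [h5]; rfl

-- ===== VERDICT =====
theorem categorize_content_type_py_spec : Claim_equal_categorize_content_type_py := by
  intro content app _
  unfold Spec_categorize_content_type_py categorize_content_type_py categorize_content_type_py_alt
  by_cases h0 : pvContentOrEmpty content = "" ∧ app = ""
  · simp [h0]
  · simp only [if_neg h0, pvChainA_eq_scan]
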